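-- pv_equiv track=rewrite | github.com/epinar/competitive_python | leetcode/778.py | bfs
-- ===== SOURCE A (Python) =====
-- def bfs(grid, T):
--
--     N = len(grid)
--     if grid[0][0]>T:
--         return False
--     bfs = [(0,0)]
--     vis = [[0] * N for i in range(N)]
--     while len(bfs):
--         i, j = bfs.pop(0)
--         if grid[i][j] <= T:
--             if i == j == N-1:
--                 return True
--             for a, b in [[i - 1, j], [i + 1, j], [i, j - 1], [i, j + 1]]:
--                 if 0 <= a < N and 0 <= b < N and vis[a][b] == False:
--                         vis[a][b] = True
--                         bfs.append((a, b))
--     return False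
-- ===== SOURCE B (Python) =====
-- def bfs(grid, T):
--     # Fixed-point relaxation instead of a BFS queue: repeatedly add every cell <= T
--     # adjacent to an already-reached cell until nothing changes, then test the corner.
--     N = len(grid)
--     if grid[0][0] > T:
--         return False
--     reach = {(0, 0)}
--     for _ in range(N * N):
--         added = set()
--         for i in range(N):
--             for j in range(N):
--                 if (i, j) not in reach and grid[i][j] <= T and (
--                         (i - 1, j) in reach or (i + 1, j) in reach
--                         or (i, j - 1) in reach or (i, j + 1) in reach):
--                     added.add((i, j))
--         if not added:
--             return (N - 1, N - 1) in reach
--         reach |= added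
--     return (N - 1, N - 1) in reach
-- ===== Notes on version B (the rewrite author's own statement) =====
-- stated objective: alternative
-- what changed: Replaces the FIFO-queue BFS with visited matrix by a monotone fixed-point relaxation: a set of reached cells is grown by whole-grid passes (add every cell <= T adjacent to a reached cell) until a pass adds nothing, then the far corner's membership is the answer.
-- outside the precondition, e.g. on bfs([[0, 9, 9], [9, 9, 9], [9, 9]], 0): A returns False, B raises IndexError
import Mathlib
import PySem

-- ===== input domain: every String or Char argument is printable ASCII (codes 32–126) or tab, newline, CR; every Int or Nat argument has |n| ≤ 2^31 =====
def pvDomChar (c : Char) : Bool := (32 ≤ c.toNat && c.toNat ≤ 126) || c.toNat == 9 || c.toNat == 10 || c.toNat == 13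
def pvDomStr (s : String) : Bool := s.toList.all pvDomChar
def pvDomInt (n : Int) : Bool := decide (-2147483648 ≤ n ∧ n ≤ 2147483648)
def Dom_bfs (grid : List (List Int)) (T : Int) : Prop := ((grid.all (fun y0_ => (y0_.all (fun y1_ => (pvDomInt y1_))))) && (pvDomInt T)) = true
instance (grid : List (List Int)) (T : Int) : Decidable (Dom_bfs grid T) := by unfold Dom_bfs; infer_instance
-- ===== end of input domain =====

-- B replaces the BFS queue by a fixed-point relaxation over a set of reached cells ('alternative');
-- equal on Pre_: A raises IndexError on empty grids / empty first row and (typically) on ragged grids it floods.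

-- ===== PORT A =====
-- grid[i][j] (indices are only used where the algorithm has checked 0 ≤ · < N, so getD is exact)
def bfsVal (grid : List (List Int)) (i j : Int) : Int :=
  (grid.getD i.toNat []).getD j.toNat 0

def bfsVisGet (vis : List (List Int)) (a b : Int) : Int :=
  (vis.getD a.toNat []).getD b.toNat 0

def bfsVisSet (vis : List (List Int)) (a b : Int) : List (List Int) :=
  vis.set a.toNat ((vis.getD a.toNat []).set b.toNat 1)

-- one neighbour [a, b]: 'if 0 <= a < N and 0 <= b < N and vis[a][b] == False: vis[a][b] = True; bfs.append((a,b))'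
def bfsTry (N : Int) (st : List (Int × Int) × List (List Int)) (ab : Int × Int) :
    List (Int × Int) × List (List Int) :=
  if 0 ≤ ab.1 ∧ ab.1 < N ∧ 0 ≤ ab.2 ∧ ab.2 < N ∧ bfsVisGet st.2 ab.1 ab.2 = 0 then
    (st.1 ++ [ab], bfsVisSet st.2 ab.1 ab.2)
  else st

-- the while loop; fuel N*N+2 bounds the number of pops (each pop removes one queue entry,
-- each append marks a fresh vis cell, so ≤ N*N appends and ≤ N*N+1 pops happen)
def bfsLoop (grid : List (List Int)) (T N : Int) :
    Nat → List (Int × Int) → List (List Int) → Bool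
  | 0, _, _ => false
  | _ + 1, [], _ => false
  | f + 1, c :: rest, vis =>
    if bfsVal grid c.1 c.2 ≤ T then
      if c.1 = N - 1 ∧ c.2 = N - 1 then true
      else
        let st := [(c.1 - 1, c.2), (c.1 + 1, c.2), (c.1, c.2 - 1), (c.1, c.2 + 1)].foldl (bfsTry N) (rest, vis)
        bfsLoop grid T N f st.1 st.2
    else bfsLoop grid T N f rest vis

def bfs (grid : List (List Int)) (T : Int) : Bool :=
  if T < bfsVal grid 0 0 then false
  else
    bfsLoop grid T (grid.length : Int) (grid.length * grid.length + 2) [(0, 0)]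
      (List.replicate grid.length (List.replicate grid.length 0))

-- ===== PORT B =====
def altVal (grid : List (List Int)) (i j : Int) : Int :=
  (grid.getD i.toNat []).getD j.toNat 0

-- one pass: the set of cells newly reachable from 'reach' (the two nested for-loops building 'added')
def altPass (grid : List (List Int)) (T N : Int) (reach : PySem.Set (Int × Int)) :
    PySem.Set (Int × Int) :=
  (PySem.List.pyRange 0 N 1).foldl (fun acc i =>
    (PySem.List.pyRange 0 N 1).foldl (fun acc j =>
      if ¬ (i, j) ∈ reach ∧ altVal grid i j ≤ T ∧
          ((i - 1, j) ∈ reach ∨ (i + 1, j) ∈ reach ∨ (i, j - 1) ∈ reach ∨ (i, j + 1) ∈ reach) then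
        PySem.Set.add acc (i, j)
      else acc) acc) PySem.Set.empty

-- 'for _ in range(N*N): … if not added: return …; reach |= added' with the final fallthrough return
def altLoop (grid : List (List Int)) (T N : Int) : Nat → PySem.Set (Int × Int) → Bool
  | 0, reach => decide ((N - 1, N - 1) ∈ reach)
  | k + 1, reach =>
    let added := altPass grid T N reach
    if added = [] then decide ((N - 1, N - 1) ∈ reach)
    else altLoop grid T N k (PySem.Set.union reach added)

def bfs_alt (grid : List (List Int)) (T : Int) : Bool :=
  if T < altVal grid 0 0 then false
  else altLoop grid T (grid.length : Int) (grid.length * grid.length) [(0, 0)]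

-- ===== PRECONDITION & SPEC =====
-- Pre_ excludes inputs where Python A raises IndexError (empty grid / empty first row), and ragged
-- grids (some row shorter than len(grid)) with grid[0][0] <= T: on those A's flood usually raises,
-- and on the few where A still returns (the short rows are walled off by >T cells) B raises instead.
def Pre_bfs (grid : List (List Int)) (T : Int) : Prop :=
  grid ≠ [] ∧ grid.getD 0 [] ≠ [] ∧
    (T < (grid.getD 0 []).getD 0 0 ∨ ∀ row ∈ grid, grid.length ≤ row.length)
instance (grid : List (List Int)) (T : Int) : Decidable (Pre_bfs grid T) := by
  unfold Pre_bfs; infer_instance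

def pvWitness_bfs : List (List Int) × Int := ([[0, 3], [2, 1]], 2)

def Spec_bfs (grid : List (List Int)) (T : Int) (out : Bool) : Prop := out = bfs_alt grid T
instance (grid : List (List Int)) (T : Int) (out : Bool) : Decidable (Spec_bfs grid T out) := by
  unfold Spec_bfs; infer_instance

-- ===== CLAIM (what is proved, stated in full; the proofs are below) =====
def Claim_equal_bfs : Prop := ∀ (grid : List (List Int)) (T : Int),
  Dom_bfs grid T → Pre_bfs grid T → Spec_bfs grid T (bfs grid T)

-- ===== LEMMAS AND PROOFS =====

-- ---- proof-only abstractions: bounds, neighbours, reachability through cells ≤ T ----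

def pvInb (n : Nat) (c : Int × Int) : Prop :=
  0 ≤ c.1 ∧ c.1 < (n : Int) ∧ 0 ≤ c.2 ∧ c.2 < (n : Int)

def pvNbrs (c : Int × Int) : List (Int × Int) :=
  [(c.1 - 1, c.2), (c.1 + 1, c.2), (c.1, c.2 - 1), (c.1, c.2 + 1)]

inductive pvRch (grid : List (List Int)) (T : Int) : Int × Int → Prop
  | base : pvRch grid T (0, 0)
  | step {c d : Int × Int} : pvRch grid T c → bfsVal grid c.1 c.2 ≤ T →
      d ∈ pvNbrs c → pvInb grid.length d → pvRch grid T d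

-- "there is a path from (0,0) to the far corner all of whose cells are ≤ T"
def pvGoal (grid : List (List Int)) (T : Int) : Prop :=
  pvRch grid T ((grid.length : Int) - 1, (grid.length : Int) - 1) ∧
    bfsVal grid ((grid.length : Int) - 1) ((grid.length : Int) - 1) ≤ T

theorem pvNbrs_symm {c d : Int × Int} (h : d ∈ pvNbrs c) : c ∈ pvNbrs d := by
  simp only [pvNbrs, List.mem_cons, List.not_mem_nil, or_false] at h ⊢
  rcases h with rfl | rfl | rfl | rfl <;> simp [Prod.ext_iff] <;> omega

-- ---- the finite list of in-bounds cells ----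

def pvCells (n : Nat) : List (Int × Int) :=
  (PySem.List.pyRange 0 (n : Int) 1).flatMap
    (fun i => (PySem.List.pyRange 0 (n : Int) 1).map (fun j => (i, j)))

theorem mem_pvCells {n : Nat} {c : Int × Int} : c ∈ pvCells n ↔ pvInb n c := by
  obtain ⟨a, b⟩ := c
  simp only [pvCells, List.mem_flatMap, List.mem_map, PySem.List.mem_pyRange_one, pvInb,
    Prod.mk.injEq]
  constructor
  · rintro ⟨i, hi, j, hj, rfl, rfl⟩
    exact ⟨hi.1, hi.2, hj.1, hj.2⟩
  · rintro ⟨h1, h2, h3, h4⟩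
    exact ⟨a, ⟨h1, h2⟩, b, ⟨h3, h4⟩, rfl, rfl⟩

theorem nodup_pvCells (n : Nat) : (pvCells n).Nodup := by
  rw [pvCells, List.nodup_flatMap]
  constructor
  · intro i _
    exact List.Nodup.map (fun a b h => by simpa using congrArg Prod.snd h)
      (PySem.List.nodup_pyRange_one _ _)
  · refine List.Pairwise.imp ?_ (PySem.List.pairwise_lt_pyRange_one _ _)
    intro a b hab x hxa hxb
    simp only [List.mem_map] at hxa hxb
    obtain ⟨j, _, rfl⟩ := hxa
    obtain ⟨j', _, h⟩ := hxb
    have hba := congrArg Prod.fst h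
    simp at hba
    omega

theorem length_pvCells (n : Nat) : (pvCells n).length = n * n := by
  simp [pvCells, List.length_flatMap, PySem.List.length_pyRange_one, List.map_const']

-- ---- the visited matrix: shape, reading, writing, counting unvisited cells ----

def pvShape (n : Nat) (vis : List (List Int)) : Prop :=
  vis.length = n ∧ ∀ r ∈ vis, r.length = n

def pvVm (vis : List (List Int)) (c : Int × Int) : Prop := bfsVisGet vis c.1 c.2 ≠ 0

def pvZeros (n : Nat) (vis : List (List Int)) : Nat :=
  (pvCells n).countP (fun c => decide (bfsVisGet vis c.1 c.2 = 0))

theorem shape_visSet {n : Nat} {vis : List (List Int)} (hs : pvShape n vis)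
    {ab : Int × Int} (hab : pvInb n ab) : pvShape n (bfsVisSet vis ab.1 ab.2) := by
  obtain ⟨hl, hr⟩ := hs
  obtain ⟨h1, h2, h3, h4⟩ := hab
  refine ⟨by simp [bfsVisSet, hl], ?_⟩
  intro r hrm
  rcases List.mem_or_eq_of_mem_set hrm with h | h
  · exact hr r h
  · subst h
    have hlt : ab.1.toNat < vis.length := by omega
    rw [List.length_set, List.getD_eq_getElem _ _ hlt]
    exact hr _ (List.getElem_mem hlt)

theorem get_visSet {n : Nat} {vis : List (List Int)} (hs : pvShape n vis)
    {ab c : Int × Int} (hab : pvInb n ab) (hc : pvInb n c) :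
    bfsVisGet (bfsVisSet vis ab.1 ab.2) c.1 c.2 =
      if c = ab then 1 else bfsVisGet vis c.1 c.2 := by
  obtain ⟨hl, hr⟩ := hs
  obtain ⟨ha1, ha2, ha3, ha4⟩ := hab
  obtain ⟨hc1, hc2, hc3, hc4⟩ := hc
  have hlta : ab.1.toNat < vis.length := by omega
  have hltc : c.1.toNat < vis.length := by omega
  have hrowa : (vis.getD ab.1.toNat []).length = n := by
    rw [List.getD_eq_getElem _ _ hlta]; exact hr _ (List.getElem_mem hlta)
  have hrowc : (vis.getD c.1.toNat []).length = n := by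
    rw [List.getD_eq_getElem _ _ hltc]; exact hr _ (List.getElem_mem hltc)
  unfold bfsVisGet bfsVisSet
  have hltc' : c.1.toNat < (vis.set ab.1.toNat ((vis.getD ab.1.toNat []).set ab.2.toNat 1)).length := by
    simpa using hltc
  rw [List.getD_eq_getElem _ _ hltc', List.getElem_set]
  by_cases hrow : ab.1.toNat = c.1.toNat
  · rw [if_pos hrow]
    have hbc : c.2.toNat < ((vis.getD ab.1.toNat []).set ab.2.toNat 1).length := by
      rw [List.length_set, hrowa]; omega
    have hbc2 : c.2.toNat < (vis.getD ab.1.toNat []).length := by rw [hrowa]; omega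
    rw [List.getD_eq_getElem _ _ hbc, List.getElem_set]
    by_cases hcol : ab.2.toNat = c.2.toNat
    · rw [if_pos hcol, if_pos (by rw [Prod.ext_iff]; omega)]
    · rw [if_neg hcol, if_neg (by rw [Prod.ext_iff]; intro h; omega), ← hrow,
        List.getD_eq_getElem _ _ hbc2]
  · rw [if_neg hrow, if_neg (by rw [Prod.ext_iff]; intro h; omega)]
    rw [List.getD_eq_getElem _ _ hltc]

theorem countP_flip {α : Type} (l : List α) (p q : α → Bool) (x : α) (hl : l.Nodup) (hx : x ∈ l)
    (hq : ∀ y ∈ l, y ≠ x → q y = p y) (hpx : p x = true) (hqx : q x = false) :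
    l.countP q + 1 = l.countP p := by
  induction l with
  | nil => cases hx
  | cons a l ih =>
    rw [List.countP_cons, List.countP_cons]
    by_cases hax : a = x
    · subst hax
      have hnotin : a ∉ l := (List.nodup_cons.mp hl).1
      have hcong : l.countP q = l.countP p :=
        List.countP_congr (fun y hy => by
          rw [hq y (List.mem_cons_of_mem _ hy) (fun h => hnotin (h ▸ hy))])
      rw [hcong, hpx, hqx]; simp
    · have hx' : x ∈ l := by
        rcases List.mem_cons.mp hx with h | h
        · exact absurd h.symm hax
        · exact h
      have hqa : q a = p a := hq a List.mem_cons_self hax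
      have := ih (List.nodup_cons.mp hl).2 hx'
        (fun y hy hne => hq y (List.mem_cons_of_mem _ hy) hne)
      rw [hqa]
      rcases Bool.eq_false_or_eq_true (p a) with h | h <;> simp [h] <;> omega

theorem zeros_visSet {n : Nat} {vis : List (List Int)} (hs : pvShape n vis)
    {ab : Int × Int} (hab : pvInb n ab) (h0 : bfsVisGet vis ab.1 ab.2 = 0) :
    pvZeros n (bfsVisSet vis ab.1 ab.2) + 1 = pvZeros n vis := by
  refine countP_flip (pvCells n) _ _ ab (nodup_pvCells n) (mem_pvCells.mpr hab) ?_ ?_ ?_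
  · intro y hy hne
    rw [get_visSet hs hab (mem_pvCells.mp hy), if_neg hne]
  · simp [h0]
  · rw [get_visSet hs hab hab, if_pos rfl]; simp

-- ---- port A: the expansion of the four neighbours preserves the invariant ----

theorem foldTry_spec (n : Nat) (L : List (Int × Int)) :
    ∀ st : List (Int × Int) × List (List Int), pvShape n st.2 →
      pvShape n (L.foldl (bfsTry (n : Int)) st).2 ∧
      (∀ x ∈ (L.foldl (bfsTry (n : Int)) st).1, x ∈ st.1 ∨ (x ∈ L ∧ pvInb n x)) ∧
      (∀ x ∈ st.1, x ∈ (L.foldl (bfsTry (n : Int)) st).1) ∧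
      (∀ c, pvInb n c → pvVm st.2 c → pvVm (L.foldl (bfsTry (n : Int)) st).2 c) ∧
      (∀ c, pvInb n c → pvVm (L.foldl (bfsTry (n : Int)) st).2 c →
        pvVm st.2 c ∨ c ∈ (L.foldl (bfsTry (n : Int)) st).1) ∧
      (∀ d ∈ L, pvInb n d → pvVm (L.foldl (bfsTry (n : Int)) st).2 d) ∧
      (pvZeros n (L.foldl (bfsTry (n : Int)) st).2 + (L.foldl (bfsTry (n : Int)) st).1.length
        = pvZeros n st.2 + st.1.length) := by
  induction L with
  | nil =>
    intro st hs
    exact ⟨hs, fun x hx => Or.inl hx, fun x hx => hx, fun c _ h => h,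
      fun c _ h => Or.inl h, by simp, rfl⟩
  | cons d L ih =>
    intro st hs
    rw [List.foldl_cons]
    by_cases hcond : 0 ≤ d.1 ∧ d.1 < (n : Int) ∧ 0 ≤ d.2 ∧ d.2 < (n : Int) ∧
        bfsVisGet st.2 d.1 d.2 = 0
    · have hd_inb : pvInb n d := ⟨hcond.1, hcond.2.1, hcond.2.2.1, hcond.2.2.2.1⟩
      have hd0 : bfsVisGet st.2 d.1 d.2 = 0 := hcond.2.2.2.2
      have hst1 : bfsTry (n : Int) st d = (st.1 ++ [d], bfsVisSet st.2 d.1 d.2) := by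
        rw [bfsTry, if_pos hcond]
      rw [hst1]
      have hs1 : pvShape n (bfsVisSet st.2 d.1 d.2) := shape_visSet hs hd_inb
      have hvm1 : ∀ c, pvInb n c →
          (pvVm (bfsVisSet st.2 d.1 d.2) c ↔ c = d ∨ pvVm st.2 c) := by
        intro c hc
        unfold pvVm
        rw [get_visSet hs hd_inb hc]
        split_ifs with h
        · simp [h]
        · simp [h]
      obtain ⟨P1, P2, P3, P4, P5, P6, P7⟩ := ih (st.1 ++ [d], bfsVisSet st.2 d.1 d.2) hs1
      refine ⟨P1, ?_, ?_, ?_, ?_, ?_, ?_⟩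
      · intro x hx
        rcases P2 x hx with h | h
        · rcases List.mem_append.mp h with h | h
          · exact Or.inl h
          · rw [List.mem_singleton.mp h]
            exact Or.inr ⟨List.mem_cons_self, hd_inb⟩
        · exact Or.inr ⟨List.mem_cons_of_mem _ h.1, h.2⟩
      · intro x hx
        exact P3 x (List.mem_append_left _ hx)
      · intro c hc hv
        exact P4 c hc ((hvm1 c hc).mpr (Or.inr hv))
      · intro c hc hv
        rcases P5 c hc hv with h | h
        · rcases (hvm1 c hc).mp h with rfl | h2
          · exact Or.inr (P3 _ (List.mem_append_right _ (List.mem_singleton_self _)))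
          · exact Or.inl h2
        · exact Or.inr h
      · intro d' hd' hinb'
        rcases List.mem_cons.mp hd' with rfl | h
        · exact P4 _ hinb' ((hvm1 _ hinb').mpr (Or.inl rfl))
        · exact P6 _ h hinb'
      · have hz := zeros_visSet hs hd_inb hd0
        rw [P7, List.length_append]
        simp only [List.length_singleton]
        omega
    · have hst1 : bfsTry (n : Int) st d = st := by rw [bfsTry, if_neg hcond]
      rw [hst1]
      obtain ⟨P1, P2, P3, P4, P5, P6, P7⟩ := ih st hs
      refine ⟨P1, ?_, P3, P4, P5, ?_, P7⟩
      · intro x hx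
        rcases P2 x hx with h | h
        · exact Or.inl h
        · exact Or.inr ⟨List.mem_cons_of_mem _ h.1, h.2⟩
      · intro d' hd' hinb'
        rcases List.mem_cons.mp hd' with rfl | h
        · have hne : bfsVisGet st.2 d'.1 d'.2 ≠ 0 := fun h0 =>
            hcond ⟨hinb'.1, hinb'.2.1, hinb'.2.2.1, hinb'.2.2.2, h0⟩
          exact P4 _ hinb' hne
        · exact P6 _ h hinb'

-- ---- port A: the loop invariant ----

def pvInvA (grid : List (List Int)) (T : Int) (q : List (Int × Int))
    (vis : List (List Int)) : Prop :=
  pvShape grid.length vis ∧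
  (∀ c ∈ q, pvInb grid.length c ∧ pvRch grid T c) ∧
  (∀ c, pvInb grid.length c → (pvVm vis c ∨ c = (0, 0)) → bfsVal grid c.1 c.2 ≤ T →
    c ∈ q ∨ (¬(c.1 = (grid.length : Int) - 1 ∧ c.2 = (grid.length : Int) - 1) ∧
      ∀ d ∈ pvNbrs c, pvInb grid.length d → pvVm vis d))

theorem qEmpty_notGoal (grid : List (List Int)) (T : Int) (vis : List (List Int))
    (hn : 1 ≤ grid.length) (hInv : pvInvA grid T [] vis) : ¬ pvGoal grid T := by
  rintro ⟨hR, hv⟩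
  obtain ⟨-, -, hC⟩ := hInv
  have key : ∀ c, pvRch grid T c → pvInb grid.length c ∧ (pvVm vis c ∨ c = (0, 0)) := by
    intro c h
    induction h with
    | base => exact ⟨⟨by omega, by omega, by omega, by omega⟩, Or.inr rfl⟩
    | step hc hval hmem hinb ih =>
      rcases hC _ ih.1 ih.2 hval with h | ⟨-, hall⟩
      · exact absurd h List.not_mem_nil
      · exact ⟨hinb, Or.inl (hall _ hmem hinb)⟩
  obtain ⟨hi, hm⟩ := key _ hR
  rcases hC _ hi hm hv with h | ⟨hne, -⟩
  · exact List.not_mem_nil h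
  · exact hne ⟨rfl, rfl⟩

theorem loopA_iff (grid : List (List Int)) (T : Int) (hn : 1 ≤ grid.length) :
    ∀ (f : Nat) (q : List (Int × Int)) (vis : List (List Int)),
      pvInvA grid T q vis → pvZeros grid.length vis + q.length ≤ f →
      (bfsLoop grid T (grid.length : Int) f q vis = true ↔ pvGoal grid T) := by
  intro f
  induction f with
  | zero =>
    intro q vis hInv hf
    match q with
    | [] =>
      simp only [bfsLoop, Bool.false_eq_true, false_iff]
      exact qEmpty_notGoal grid T vis hn hInv
    | c :: rest => exact absurd hf (by simp)
  | succ f ih =>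
    intro q vis hInv hf
    match q with
    | [] =>
      simp only [bfsLoop, Bool.false_eq_true, false_iff]
      exact qEmpty_notGoal grid T vis hn hInv
    | c :: rest =>
      obtain ⟨hsh, hA, hC⟩ := hInv
      simp only [bfsLoop]
      by_cases hval : bfsVal grid c.1 c.2 ≤ T
      · rw [if_pos hval]
        by_cases htgt : c.1 = (grid.length : Int) - 1 ∧ c.2 = (grid.length : Int) - 1
        · rw [if_pos htgt]
          simp only [true_iff]
          have hc := (hA c List.mem_cons_self).2
          have hceq : c = ((grid.length : Int) - 1, (grid.length : Int) - 1) := by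
            rw [Prod.ext_iff]; exact htgt
          rw [hceq] at hc hval
          exact ⟨hc, hval⟩
        · rw [if_neg htgt]
          have hL : [(c.1 - 1, c.2), (c.1 + 1, c.2), (c.1, c.2 - 1), (c.1, c.2 + 1)] =
              pvNbrs c := rfl
          rw [hL]
          obtain ⟨P1, P2, P3, P4, P5, P6, P7⟩ :=
            foldTry_spec grid.length (pvNbrs c) (rest, vis) hsh
          apply ih
          · refine ⟨P1, ?_, ?_⟩
            · intro x hx
              rcases P2 x hx with hxr | ⟨hxn, hxi⟩
              · exact hA x (List.mem_cons_of_mem _ hxr)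
              · exact ⟨hxi, pvRch.step (hA c List.mem_cons_self).2 hval hxn hxi⟩
            · intro x hxi hxm hxv
              rcases hxm with hxm | hx0
              · rcases P5 x hxi hxm with hold | hnew
                · rcases hC x hxi (Or.inl hold) hxv with hq | ⟨hne, hall⟩
                  · rcases List.mem_cons.mp hq with rfl | hr
                    · exact Or.inr ⟨htgt, fun d hd hdi => P6 d hd hdi⟩
                    · exact Or.inl (P3 x hr)
                  · exact Or.inr ⟨hne, fun d hd hdi => P4 d hdi (hall d hd hdi)⟩
                · exact Or.inl hnew
              · rcases hC x hxi (Or.inr hx0) hxv with hq | ⟨hne, hall⟩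
                · rcases List.mem_cons.mp hq with rfl | hr
                  · exact Or.inr ⟨htgt, fun d hd hdi => P6 d hd hdi⟩
                  · exact Or.inl (P3 x hr)
                · exact Or.inr ⟨hne, fun d hd hdi => P4 d hdi (hall d hd hdi)⟩
          · have P7' : pvZeros grid.length
                  (List.foldl (bfsTry (grid.length : Int)) (rest, vis) (pvNbrs c)).2 +
                (List.foldl (bfsTry (grid.length : Int)) (rest, vis) (pvNbrs c)).1.length =
                pvZeros grid.length vis + rest.length := P7
            have hlen : (c :: rest).length = rest.length + 1 := List.length_cons ..
            omega
      · rw [if_neg hval]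
        apply ih
        · refine ⟨hsh, ?_, ?_⟩
          · intro x hx
            exact hA x (List.mem_cons_of_mem _ hx)
          · intro x hxi hxm hxv
            rcases hC x hxi hxm hxv with hq | hr
            · rcases List.mem_cons.mp hq with rfl | hr2
              · exact absurd hxv hval
              · exact Or.inl hr2
            · exact Or.inr hr
        · have hlen : (c :: rest).length = rest.length + 1 := List.length_cons ..
          omega

theorem get_replicate0 (n : Nat) (a b : Int) :
    bfsVisGet (List.replicate n (List.replicate n (0 : Int))) a b = 0 := by
  unfold bfsVisGet
  have h1 : (List.replicate n (List.replicate n (0 : Int))).getD a.toNat [] =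
        List.replicate n (0 : Int) ∨
      (List.replicate n (List.replicate n (0 : Int))).getD a.toNat [] = [] := by
    rcases Nat.lt_or_ge a.toNat n with h | h
    · left
      rw [List.getD_eq_getElem _ _ (by simpa using h)]
      exact List.getElem_replicate ..
    · right
      rw [List.getD_eq_getElem?_getD, List.getElem?_eq_none (by simpa using h)]
      rfl
  rcases h1 with h1 | h1 <;> rw [h1]
  · rcases Nat.lt_or_ge b.toNat n with h2 | h2
    · rw [List.getD_eq_getElem _ _ (by simpa using h2)]
      exact List.getElem_replicate ..
    · rw [List.getD_eq_getElem?_getD, List.getElem?_eq_none (by simpa using h2)]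
      rfl
  · rfl

theorem bfs_iff (grid : List (List Int)) (T : Int) (hn : 1 ≤ grid.length)
    (h00 : bfsVal grid 0 0 ≤ T) : (bfs grid T = true ↔ pvGoal grid T) := by
  unfold bfs
  rw [if_neg (not_lt.mpr h00)]
  have hz : pvZeros grid.length (List.replicate grid.length (List.replicate grid.length 0)) =
      grid.length * grid.length := by
    rw [pvZeros, List.countP_eq_length.mpr, length_pvCells]
    intro c hc
    simp [get_replicate0]
  apply loopA_iff grid T hn
  · refine ⟨⟨List.length_replicate, ?_⟩, ?_, ?_⟩
    · intro r hr
      rw [List.eq_of_mem_replicate hr]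
      exact List.length_replicate
    · intro c hc
      rw [List.mem_singleton.mp hc]
      exact ⟨⟨by omega, by omega, by omega, by omega⟩, pvRch.base⟩
    · intro c hci hcm hcv
      rcases hcm with hvm | h0
      · exact absurd (get_replicate0 grid.length c.1 c.2) hvm
      · rw [h0]
        exact Or.inl List.mem_cons_self
  · rw [hz]
    simp

-- ---- port B: membership in one relaxation pass ----

theorem mem_altPass (grid : List (List Int)) (T : Int) (n : Nat)
    (reach : PySem.Set (Int × Int)) (x : Int × Int) :
    x ∈ altPass grid T (n : Int) reach ↔
      pvInb n x ∧ ¬ x ∈ reach ∧ bfsVal grid x.1 x.2 ≤ T ∧ ∃ d ∈ pvNbrs x, d ∈ reach := by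
  have inner : ∀ (i : Int) (l : List Int) (acc : PySem.Set (Int × Int)) (y : Int × Int),
      (y ∈ l.foldl (fun acc j =>
          if ¬ (i, j) ∈ reach ∧ altVal grid i j ≤ T ∧
              ((i - 1, j) ∈ reach ∨ (i + 1, j) ∈ reach ∨ (i, j - 1) ∈ reach ∨
                (i, j + 1) ∈ reach) then
            PySem.Set.add acc (i, j)
          else acc) acc ↔
        y ∈ acc ∨ ∃ j ∈ l, (¬ (i, j) ∈ reach ∧ altVal grid i j ≤ T ∧
            ((i - 1, j) ∈ reach ∨ (i + 1, j) ∈ reach ∨ (i, j - 1) ∈ reach ∨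
              (i, j + 1) ∈ reach)) ∧ y = (i, j)) := by
    intro i l
    induction l with
    | nil => intro acc y; simp
    | cons j l ih =>
      intro acc y
      rw [List.foldl_cons, ih]
      simp only [List.exists_mem_cons_iff]
      split_ifs with hc
      · rw [PySem.Set.mem_add]
        constructor
        · rintro (h | h)
          · rcases h with h | h
            · exact Or.inl h
            · exact Or.inr (Or.inl ⟨hc, h⟩)
          · exact Or.inr (Or.inr h)
        · rintro (h | h)
          · exact Or.inl (Or.inl h)
          · rcases h with ⟨-, hy⟩ | h
            · exact Or.inl (Or.inr hy)
            · exact Or.inr h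
      · constructor
        · rintro (h | h)
          · exact Or.inl h
          · exact Or.inr (Or.inr h)
        · rintro (h | h)
          · exact Or.inl h
          · rcases h with ⟨hCj, -⟩ | h
            · exact absurd hCj hc
            · exact Or.inr h
  have outer : ∀ (li : List Int) (acc : PySem.Set (Int × Int)) (y : Int × Int),
      (y ∈ li.foldl (fun acc i => (PySem.List.pyRange 0 (n : Int) 1).foldl (fun acc j =>
          if ¬ (i, j) ∈ reach ∧ altVal grid i j ≤ T ∧
              ((i - 1, j) ∈ reach ∨ (i + 1, j) ∈ reach ∨ (i, j - 1) ∈ reach ∨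
                (i, j + 1) ∈ reach) then
            PySem.Set.add acc (i, j)
          else acc) acc) acc ↔
        y ∈ acc ∨ ∃ i ∈ li, ∃ j ∈ PySem.List.pyRange 0 (n : Int) 1,
          (¬ (i, j) ∈ reach ∧ altVal grid i j ≤ T ∧
            ((i - 1, j) ∈ reach ∨ (i + 1, j) ∈ reach ∨ (i, j - 1) ∈ reach ∨
              (i, j + 1) ∈ reach)) ∧ y = (i, j)) := by
    intro li
    induction li with
    | nil => intro acc y; simp
    | cons i li ih =>
      intro acc y
      rw [List.foldl_cons, ih, inner]
      simp only [List.exists_mem_cons_iff]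
      exact or_assoc
  unfold altPass
  rw [outer]
  constructor
  · rintro (h | ⟨i, hi, j, hj, hcond, rfl⟩)
    · exact absurd h List.not_mem_nil
    · obtain ⟨hi1, hi2⟩ := PySem.List.mem_pyRange_one.mp hi
      obtain ⟨hj1, hj2⟩ := PySem.List.mem_pyRange_one.mp hj
      refine ⟨⟨hi1, hi2, hj1, hj2⟩, hcond.1, hcond.2.1, ?_⟩
      rcases hcond.2.2 with h | h | h | h
      · exact ⟨(i - 1, j), by simp [pvNbrs], h⟩
      · exact ⟨(i + 1, j), by simp [pvNbrs], h⟩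
      · exact ⟨(i, j - 1), by simp [pvNbrs], h⟩
      · exact ⟨(i, j + 1), by simp [pvNbrs], h⟩
  · rintro ⟨hinb, hmem, hval, d, hd, hdr⟩
    refine Or.inr ⟨x.1, PySem.List.mem_pyRange_one.mpr ⟨hinb.1, hinb.2.1⟩, x.2,
      PySem.List.mem_pyRange_one.mpr ⟨hinb.2.2.1, hinb.2.2.2⟩, ⟨?_, hval, ?_⟩, ?_⟩
    · rw [Prod.mk.eta]
      exact hmem
    · simp only [pvNbrs, List.mem_cons, List.not_mem_nil, or_false] at hd
      rcases hd with rfl | rfl | rfl | rfl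
      · exact Or.inl hdr
      · exact Or.inr (Or.inl hdr)
      · exact Or.inr (Or.inr (Or.inl hdr))
      · exact Or.inr (Or.inr (Or.inr hdr))
    · exact Prod.mk.eta.symm

-- ---- port B: the reached set grows strictly while passes keep adding cells ----

theorem length_le_foldl_add (t : List (Int × Int)) :
    ∀ s : PySem.Set (Int × Int), s.length ≤ (t.foldl PySem.Set.add s).length := by
  induction t with
  | nil => intro s; exact le_refl _
  | cons x t ih =>
    intro s
    rw [List.foldl_cons]
    refine le_trans ?_ (ih _)
    rw [PySem.Set.add_eq_ite]
    split_ifs with h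
    · exact le_refl _
    · simp

theorem length_lt_foldl_add (t : List (Int × Int)) :
    ∀ (s : PySem.Set (Int × Int)) (x : Int × Int), x ∈ t → ¬ x ∈ s →
      s.length < (t.foldl PySem.Set.add s).length := by
  induction t with
  | nil => intro s x hx _; exact absurd hx List.not_mem_nil
  | cons b t ih =>
    intro s x hx hxs
    rw [List.foldl_cons]
    by_cases hxb : x = b
    · subst hxb
      rw [PySem.Set.add_of_not_mem hxs]
      calc s.length < (s ++ [x]).length := by simp
        _ ≤ _ := length_le_foldl_add t _
    · have hx' : x ∈ t := by
        rcases List.mem_cons.mp hx with h | h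
        · exact absurd h hxb
        · exact h
      by_cases hxa : x ∈ PySem.Set.add s b
      · exfalso
        rw [PySem.Set.add_eq_ite] at hxa
        split_ifs at hxa with h
        · exact hxs hxa
        · rcases List.mem_append.mp hxa with h2 | h2
          · exact hxs h2
          · exact hxb (List.mem_singleton.mp h2)
      · refine lt_of_le_of_lt ?_ (ih _ x hx' hxa)
        rw [PySem.Set.add_eq_ite]
        split_ifs with h
        · exact le_refl _
        · simp

-- ---- port B: the relaxation loop answers exactly reachability ----

theorem loopB_iff (grid : List (List Int)) (T : Int) (hn : 1 ≤ grid.length) :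
    ∀ (k : Nat) (reach : PySem.Set (Int × Int)),
      reach.Nodup →
      (∀ x ∈ reach, pvInb grid.length x ∧ pvRch grid T x ∧ bfsVal grid x.1 x.2 ≤ T) →
      (0, 0) ∈ reach →
      grid.length * grid.length < reach.length + k →
      (altLoop grid T (grid.length : Int) k reach = true ↔ pvGoal grid T) := by
  intro k
  induction k with
  | zero =>
    intro reach hnd hmem h0 hk
    exfalso
    have hsub : reach ⊆ pvCells grid.length := fun x hx => mem_pvCells.mpr (hmem x hx).1
    have hle := (hnd.subperm hsub).length_le
    rw [length_pvCells] at hle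
    omega
  | succ k ih =>
    intro reach hnd hmem h0 hk
    simp only [altLoop]
    by_cases hadd : altPass grid T (grid.length : Int) reach = []
    · rw [if_pos hadd, decide_eq_true_eq]
      constructor
      · intro h
        exact ⟨(hmem _ h).2.1, (hmem _ h).2.2⟩
      · rintro ⟨hR, hv⟩
        have closed : ∀ y, pvInb grid.length y → bfsVal grid y.1 y.2 ≤ T →
            (∃ d ∈ pvNbrs y, d ∈ reach) → y ∈ reach := by
          intro y h1 h2 h3
          by_contra hy
          have hmem2 : y ∈ altPass grid T (grid.length : Int) reach :=
            (mem_altPass grid T grid.length reach y).mpr ⟨h1, hy, h2, h3⟩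
          rw [hadd] at hmem2
          exact List.not_mem_nil hmem2
        have key : ∀ c, pvRch grid T c → bfsVal grid c.1 c.2 ≤ T → c ∈ reach := by
          intro c h
          induction h with
          | base => intro _; exact h0
          | step hc hval hmem2 hinb ihc =>
            intro hvald
            exact closed _ hinb hvald ⟨_, pvNbrs_symm hmem2, ihc hval⟩
        exact key _ hR hv
    · rw [if_neg hadd]
      obtain ⟨y, hy⟩ := List.exists_mem_of_ne_nil _ hadd
      have hyp := (mem_altPass grid T grid.length reach y).mp hy
      apply ih
      · exact PySem.Set.nodup_union reach _ hnd
      · intro x hx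
        rcases (PySem.Set.mem_union reach _ x).mp hx with h | h
        · exact hmem x h
        · obtain ⟨h1, h2, h3, d, hd, hdr⟩ := (mem_altPass grid T grid.length reach x).mp h
          obtain ⟨hdi, hdR, hdv⟩ := hmem d hdr
          exact ⟨h1, pvRch.step hdR hdv (pvNbrs_symm hd) h1, h3⟩
      · exact (PySem.Set.mem_union reach _ (0, 0)).mpr (Or.inl h0)
      · have hlt : reach.length <
            (PySem.Set.union reach (altPass grid T (grid.length : Int) reach)).length :=
          length_lt_foldl_add _ reach y hy hyp.2.1
        omega

theorem alt_iff (grid : List (List Int)) (T : Int) (hn : 1 ≤ grid.length)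
    (h00 : bfsVal grid 0 0 ≤ T) : (bfs_alt grid T = true ↔ pvGoal grid T) := by
  unfold bfs_alt
  have h00' : ¬ T < altVal grid 0 0 := not_lt.mpr h00
  rw [if_neg h00']
  apply loopB_iff grid T hn
  · exact List.nodup_singleton _
  · intro x hx
    rw [List.mem_singleton.mp hx]
    exact ⟨⟨by omega, by omega, by omega, by omega⟩, pvRch.base, h00⟩
  · exact List.mem_singleton_self _
  · simp

-- ===== VERDICT (by name: the statement is the Claim_ definition above) =====
theorem bfs_spec : Claim_equal_bfs := by
  unfold Claim_equal_bfs
  intro grid T _ hPre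
  unfold Spec_bfs
  obtain ⟨hne, -, -⟩ := hPre
  have hn : 1 ≤ grid.length := List.length_pos_iff.mpr hne
  by_cases h00 : T < bfsVal grid 0 0
  · have h00' : T < altVal grid 0 0 := h00
    unfold bfs bfs_alt
    rw [if_pos h00, if_pos h00']
  · push_neg at h00
    exact Bool.eq_iff_iff.mpr ((bfs_iff grid T hn h00).trans (alt_iff grid T hn h00).symm)
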